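-- pv_equiv track=rewrite | github.com/KevinKim-KOR/krx_hyungsoo | app/tuning/sensitivity_scan.py | determine_range
-- ===== SOURCE A (Python) =====
-- def determine_range(rows, baseline_value):
--     """감도 있는 값 + baseline 기반으로 최종 범위 결정."""
--     sensitive_vals = [
--         r["test_value"]
--         for r in rows
--         if r["sensitive"] and not r["dead_zone"]
--     ]
--     # baseline도 유효 범위에 포함
--     all_valid = sorted(set(sensitive_vals + [baseline_value]))
--
--     if len(all_valid) < 2:
--         return None, True  # LOW_SENSITIVITY
--
--     # baseline을 포함하는 연속 band 찾기
--     # (test_values가 이산적이므로, all_valid의 min~max를 band로)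
--     return (min(all_valid), max(all_valid)), False
-- ===== SOURCE B (Python) =====
-- def determine_range(rows, baseline_value):
--     """One pass over rows tracking the running min/max; no set, no sort."""
--     lo = hi = baseline_value
--     for r in rows:
--         if r["sensitive"] and not r["dead_zone"]:
--             v = r["test_value"]
--             if v < lo:
--                 lo = v
--             if v > hi:
--                 hi = v
--     if lo == hi:
--         return None, True  # LOW_SENSITIVITY
--     return (lo, hi), False
-- ===== Notes on version B (the rewrite author's own statement) =====
-- stated objective: simpler
-- what changed: Replaces A's 'collect values, deduplicate into a set, sort, count distinct, then take min/max' with a single pass over rows maintaining a running lo/hi initialised to the baseline; the distinctness test len<2 becomes lo==hi.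
import Mathlib
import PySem

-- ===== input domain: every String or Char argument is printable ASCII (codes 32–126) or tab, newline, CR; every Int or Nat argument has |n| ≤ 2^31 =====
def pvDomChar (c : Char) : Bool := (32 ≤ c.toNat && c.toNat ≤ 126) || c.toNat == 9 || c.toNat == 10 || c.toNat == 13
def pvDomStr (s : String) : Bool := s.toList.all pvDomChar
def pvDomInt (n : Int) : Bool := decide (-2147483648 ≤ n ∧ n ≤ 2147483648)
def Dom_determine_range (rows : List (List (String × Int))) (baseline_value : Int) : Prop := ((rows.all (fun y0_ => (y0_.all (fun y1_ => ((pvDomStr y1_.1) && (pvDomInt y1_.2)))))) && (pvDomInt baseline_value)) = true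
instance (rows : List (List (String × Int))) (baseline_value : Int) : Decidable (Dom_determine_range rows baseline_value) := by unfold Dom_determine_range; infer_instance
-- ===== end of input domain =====

-- B replaces A's dedup-sort-count pipeline by a single running min/max pass (objective: simpler).

-- ===== PORT A =====
-- shared with B only through the row condition/value, which both Pythons spell identically
def pvKeep (r : List (String × Int)) : Bool :=
  ((PySem.Dict.mk r).getD "sensitive" 0 != 0) && ((PySem.Dict.mk r).getD "dead_zone" 0 == 0)

def pvVal (r : List (String × Int)) : Int := (PySem.Dict.mk r).getD "test_value" 0

def determine_range (rows : List (List (String × Int))) (baseline_value : Int) : (Option (Int × Int)) × Bool :=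
  let sensitive_vals := (rows.filter pvKeep).map pvVal
  let all_valid := PySem.List.sorted (PySem.Set.ofList (sensitive_vals ++ [baseline_value])) (fun x => x) false
  if all_valid.length < 2 then (none, true)
  else (some ((PySem.List.min? all_valid (fun x => x)).getD 0, (PySem.List.max? all_valid (fun x => x)).getD 0), false)

-- ===== PORT B =====
def determine_range_alt (rows : List (List (String × Int))) (baseline_value : Int) : (Option (Int × Int)) × Bool :=
  let p := rows.foldl
    (fun (p : Int × Int) r =>
      if pvKeep r then
        let v := pvVal r
        (if v < p.1 then v else p.1, if v > p.2 then v else p.2)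
      else p)
    (baseline_value, baseline_value)
  if p.1 = p.2 then (none, true) else (some (p.1, p.2), false)

-- ===== PRECONDITION & SPEC =====
-- Pre_ excludes exactly the rows on which Python A raises KeyError: a missing "sensitive" key,
-- a missing "dead_zone" key when "sensitive" is truthy, or a missing "test_value" key when the
-- row qualifies (Python short-circuits, so later keys are only needed conditionally).
def Pre_determine_range (rows : List (List (String × Int))) (_baseline_value : Int) : Prop :=
  (rows.all (fun r =>
    match (PySem.Dict.mk r).get? "sensitive" with
    | none => false
    | some s =>
      if s = 0 then true
      else
        match (PySem.Dict.mk r).get? "dead_zone" with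
        | none => false
        | some dz =>
          if dz ≠ 0 then true
          else ((PySem.Dict.mk r).get? "test_value").isSome)) = true
instance (rows : List (List (String × Int))) (baseline_value : Int) : Decidable (Pre_determine_range rows baseline_value) := by unfold Pre_determine_range; infer_instance

def pvWitness_determine_range : (List (List (String × Int))) × Int :=
  ([[("sensitive", 1), ("dead_zone", 0), ("test_value", 5)], [("sensitive", 0)]], 2)

def Spec_determine_range (rows : List (List (String × Int))) (baseline_value : Int) (out : (Option (Int × Int)) × Bool) : Prop := out = determine_range_alt rows baseline_value
instance (rows : List (List (String × Int))) (baseline_value : Int) (out : (Option (Int × Int)) × Bool) : Decidable (Spec_determine_range rows baseline_value out) := by unfold Spec_determine_range; infer_instance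

-- ===== CLAIM (what is proved, stated in full; the proofs are below) =====
def Claim_equal_determine_range : Prop := ∀ (rows : List (List (String × Int))) (baseline_value : Int), Dom_determine_range rows baseline_value → Pre_determine_range rows baseline_value → Spec_determine_range rows baseline_value (determine_range rows baseline_value)

-- ===== LEMMAS AND PROOFS =====

-- B's fold computes the running min/max of the kept values, i.e. min?/max? of baseline :: vals.
theorem pv_fold_eq (rows : List (List (String × Int))) (a b : Int) :
    rows.foldl
      (fun (p : Int × Int) r =>
        if pvKeep r then
          let v := pvVal r
          (if v < p.1 then v else p.1, if v > p.2 then v else p.2)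
        else p)
      (a, b)
    = (((rows.filter pvKeep).map pvVal).foldl min a,
       ((rows.filter pvKeep).map pvVal).foldl max b) := by
  induction rows generalizing a b with
  | nil => simp
  | cons r t ih =>
    by_cases h : pvKeep r = true <;>
      simp [h, ih, min_def, max_def] <;>
      (constructor <;> congr 1 <;> omega)

theorem pv_min_char (a : Int) (l : List Int) :
    l.foldl min a ∈ a :: l ∧ ∀ y ∈ a :: l, l.foldl min a ≤ y := by
  have h := PySem.List.min?_id_cons a l
  exact ⟨PySem.List.min?_mem h, PySem.List.min?_isMin h⟩

theorem pv_max_char (a : Int) (l : List Int) :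
    l.foldl max a ∈ a :: l ∧ ∀ y ∈ a :: l, y ≤ l.foldl max a := by
  have h := PySem.List.max?_id_cons a l
  exact ⟨PySem.List.max?_mem h, PySem.List.max?_isMax h⟩

-- core: A's dedup/sort/count pipeline equals the min/max formulation, for any value list and baseline
theorem pv_AB (vals : List Int) (b : Int) :
    (if (PySem.List.sorted (PySem.Set.ofList (vals ++ [b])) (fun x => x) false).length < 2
     then ((none : Option (Int × Int)), true)
     else (some ((PySem.List.min? (PySem.List.sorted (PySem.Set.ofList (vals ++ [b])) (fun x => x) false) (fun x => x)).getD 0,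
                 (PySem.List.max? (PySem.List.sorted (PySem.Set.ofList (vals ++ [b])) (fun x => x) false) (fun x => x)).getD 0), false))
    = (if vals.foldl min b = vals.foldl max b then (none, true)
       else (some (vals.foldl min b, vals.foldl max b), false)) := by
  set lo := vals.foldl min b with hlo
  set hi := vals.foldl max b with hhi
  set sl := PySem.List.sorted (PySem.Set.ofList (vals ++ [b])) (fun x => x) false with hsl
  have hmem : ∀ x : Int, x ∈ sl ↔ x ∈ b :: vals := by
    intro x
    rw [hsl, PySem.List.mem_sorted, PySem.Set.mem_ofList]
    simp [List.mem_append, or_comm]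
  have hlomem : lo ∈ b :: vals := (pv_min_char _ _).1
  have hlole : ∀ y ∈ b :: vals, lo ≤ y := (pv_min_char _ _).2
  have hhimem : hi ∈ b :: vals := (pv_max_char _ _).1
  have hhile : ∀ y ∈ b :: vals, y ≤ hi := (pv_max_char _ _).2
  have hnd : sl.Nodup := by
    rw [hsl]
    exact (PySem.List.sorted_perm _ _ _).nodup_iff.mpr (PySem.Set.nodup_ofList _)
  have hlosl : lo ∈ sl := (hmem lo).mpr hlomem
  have hhisl : hi ∈ sl := (hmem hi).mpr hhimem
  have hne : sl ≠ [] := List.ne_nil_of_mem hlosl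
  have hiff : sl.length < 2 ↔ lo = hi := by
    constructor
    · intro hlen
      have h1 : sl.length = 1 := by
        have := List.length_pos_iff.mpr hne
        omega
      obtain ⟨x, hx⟩ := List.length_eq_one_iff.mp h1
      rw [hx] at hlosl hhisl
      simp at hlosl hhisl
      omega
    · intro heq
      by_contra hlen
      have h2 : 2 ≤ sl.length := by omega
      have h01 : (0 : Nat) < sl.length := by omega
      have h11 : (1 : Nat) < sl.length := by omega
      have hgne : sl[0] ≠ sl[1] := by
        intro h
        have := (List.Nodup.getElem_inj_iff hnd).mp h
        omega
      have e0 : sl[0] = lo := by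
        have hm := (hmem sl[0]).mp (sl.getElem_mem h01)
        have := hlole _ hm
        have := hhile _ hm
        omega
      have e1 : sl[1] = lo := by
        have hm := (hmem sl[1]).mp (sl.getElem_mem h11)
        have := hlole _ hm
        have := hhile _ hm
        omega
      exact hgne (by rw [e0, e1])
  by_cases hc : lo = hi
  · rw [if_pos (hiff.mpr hc), if_pos hc]
  · rw [if_neg (fun h => hc (hiff.mp h)), if_neg hc]
    obtain ⟨x, t, hxt⟩ := List.exists_cons_of_ne_nil hne
    rw [hxt, PySem.List.min?_id_cons, PySem.List.max?_id_cons]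
    have hm := pv_min_char x t
    have hM := pv_max_char x t
    rw [hxt] at hmem
    have e1 : t.foldl min x = lo := by
      have h1 := hlole _ ((hmem _).mp hm.1)
      have h2 := hm.2 lo ((hmem lo).mpr hlomem)
      omega
    have e2 : t.foldl max x = hi := by
      have h1 := hhile _ ((hmem _).mp hM.1)
      have h2 := hM.2 hi ((hmem hi).mpr hhimem)
      omega
    rw [e1, e2]
    rfl

theorem determine_range_spec : Claim_equal_determine_range := by
  intro rows baseline_value _ _
  unfold Spec_determine_range determine_range determine_range_alt
  rw [pv_fold_eq]
  exact pv_AB ((rows.filter pvKeep).map pvVal) baseline_value
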